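-- pv_equiv track=rewrite | github.com/my-drafts/paXX | pa06/pa06c.py | Kanten
-- ===== SOURCE A (Python) =====
-- import math
--
-- def Sigma(N):
-- 	range2 = int(math.ceil(float(N)/2))+1
-- 	return sum([n for n in range(1, min(N, range2)) if N%n==0])
--
-- def Kanten(L):
-- 	#return [(l, ll) for l in L for ll in L if l==Sigma(ll)]
-- 	result = []
-- 	for l in L:
-- 		sl = Sigma(l)
-- 		for ll in L:
-- 			if not(sl==l) and (sl==ll):
-- 				result += [(ll, l)]
-- 	return result
-- ===== SOURCE B (Python) =====
-- import math
--
-- def Sigma(N):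
--     # proper-divisor sum via the sqrt divisor-pairing scan: each divisor d <= isqrt(N)
--     # contributes d and its cofactor N//d; correct the double-counted sqrt of a perfect
--     # square; subtract N itself to keep only proper divisors.
--     if N < 1:
--         return 0
--     s = 0
--     r = math.isqrt(N)
--     for d in range(1, r + 1):
--         if N % d == 0:
--             s += d + N // d
--     if r * r == N:
--         s -= r
--     return s - N
--
-- def Kanten(L):
--     # one counting pass over L, then emit count[Sigma(l)] copies of (Sigma(l), l) per l
--     count = {}
--     for x in L:
--         count[x] = count.get(x, 0) + 1
--     result = []
--     for l in L:
--         sl = Sigma(l)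
--         if sl != l:
--             result += [(sl, l)] * count.get(sl, 0)
--     return result
-- ===== Notes on version B (the rewrite author's own statement) =====
-- stated objective: faster
-- what changed: B computes Sigma by the sqrt divisor-pairing scan (each divisor d <= isqrt(N) contributes d and N//d, correcting the double-counted square root and subtracting N) instead of A's scan of all candidates up to N/2, and replaces A's inner scan over L by one counting pass plus direct emission of count[Sigma(l)] copies of (Sigma(l), l).
import Mathlib
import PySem

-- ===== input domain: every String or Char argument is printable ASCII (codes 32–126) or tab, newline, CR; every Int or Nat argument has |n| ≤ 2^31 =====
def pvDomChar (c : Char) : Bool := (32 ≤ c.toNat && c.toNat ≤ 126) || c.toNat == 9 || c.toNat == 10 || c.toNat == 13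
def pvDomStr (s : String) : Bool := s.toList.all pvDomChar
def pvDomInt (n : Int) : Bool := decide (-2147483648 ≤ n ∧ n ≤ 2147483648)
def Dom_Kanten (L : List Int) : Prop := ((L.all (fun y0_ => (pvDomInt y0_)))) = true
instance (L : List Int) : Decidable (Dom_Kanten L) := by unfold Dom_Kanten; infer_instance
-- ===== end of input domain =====

-- B computes Sigma by the sqrt divisor-pairing scan instead of A's scan up to N/2, and a
-- counting pass replaces A's inner scan over L (measurably faster; return value only).

-- ===== PORT A =====
-- int(math.ceil(float(N)/2)) = ceil(N/2) = -((-N)//2), exact since float(N) is exact for |N| ≤ 2^31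
def SigmaA (N : Int) : Int :=
  let range2 : Int := -(PySem.Int.floordiv (-N) 2) + 1
  ((PySem.List.pyRange 1 (min N range2) 1).filter (fun n => PySem.Int.mod N n == 0)).sum

def Kanten (L : List Int) : List (Int × Int) :=
  L.foldl (fun result l =>
    let sl := SigmaA l
    L.foldl (fun result ll =>
      if !(sl == l) && (sl == ll) then result ++ [(ll, l)] else result) result) []

-- ===== PORT B =====
-- math.isqrt(N) for N ≥ 0 is exactly Nat.sqrt N.toNat (B only reaches it when 1 ≤ N)
def SigmaB (N : Int) : Int :=
  if N < 1 then 0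
  else
    let r : Int := ((Nat.sqrt N.toNat : Nat) : Int)
    let s : Int := (PySem.List.pyRange 1 (r + 1) 1).foldl
      (fun s d => if PySem.Int.mod N d == 0 then s + d + PySem.Int.floordiv N d else s) 0
    let s : Int := if r * r == N then s - r else s
    s - N

def Kanten_alt (L : List Int) : List (Int × Int) :=
  let count := L.foldl (fun d x => d.insert x (d.getD x 0 + 1)) PySem.Dict.empty
  L.foldl (fun result l =>
    let sl := SigmaB l
    if sl != l then result ++ PySem.List.pyRepeat [(sl, l)] (count.getD sl 0) else result) []

-- ===== PRECONDITION & SPEC =====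
def Spec_Kanten (L : List Int) (out : List (Int × Int)) : Prop := out = Kanten_alt L
instance (L : List Int) (out : List (Int × Int)) : Decidable (Spec_Kanten L out) := by unfold Spec_Kanten; infer_instance

-- ===== CLAIM (what is proved, stated in full; the proofs are below) =====
def Claim_equal_Kanten : Prop := ∀ (L : List Int), Dom_Kanten L → Spec_Kanten L (Kanten L)

-- ===== LEMMAS AND PROOFS =====

-- A filtered-range sum over Python ints equals a Finset divisor-conditioned sum over ℕ.
theorem pysum_eq (n : Nat) (f : Int → Int) (g : Nat → Nat)
    (hfg : ∀ d : Nat, 1 ≤ d → d ∣ n → f (d : Int) = (g d : Int)) (t : Nat) :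
    (((PySem.List.pyRange 1 (1 + (t : Int)) 1).filter
        (fun d => PySem.Int.mod (n : Int) d == 0)).map f).sum
      = ((∑ d ∈ Finset.Ico 1 (1 + t), if d ∣ n then g d else 0 : Nat) : Int) := by
  induction t with
  | zero => simp [PySem.List.pyRange_one_eq_nil]
  | succ t ih =>
    have hsplit : (1 + ((t + 1 : Nat) : Int)) = (1 + (t : Int)) + 1 := by push_cast; ring
    rw [hsplit, PySem.List.pyRange_one_succ_right (by omega)]
    have htop : 1 + (t + 1) = (1 + t) + 1 := by omega
    rw [htop, Finset.sum_Ico_succ_top (by omega)]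
    by_cases hdvd : (1 + t) ∣ n
    · have hm : PySem.Int.mod (n : Int) (1 + (t : Int)) = 0 := by
        rw [PySem.Int.mod_eq_zero_iff_dvd]; exact_mod_cast Int.natCast_dvd_natCast.mpr hdvd
      have hf : f (1 + (t : Int)) = ((g (1 + t) : Nat) : Int) := by
        have := hfg (1 + t) (by omega) hdvd
        push_cast at this
        exact this
      simp only [List.filter_append, List.map_append, List.sum_append, ih]
      simp [hm, hdvd, hf]
    · have hm : ¬ PySem.Int.mod (n : Int) (1 + (t : Int)) = 0 := by
        rw [PySem.Int.mod_eq_zero_iff_dvd]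
        intro h
        exact hdvd (by exact_mod_cast h)
      simp only [List.filter_append, List.map_append, List.sum_append, ih]
      simp [hm, hdvd]

-- B's accumulation loop as a filtered-map sum.
theorem foldl_if_add (p : Int → Bool) (f : Int → Int) (l : List Int) (init : Int) :
    l.foldl (fun s d => if p d then s + f d else s) init
      = init + ((l.filter p).map f).sum := by
  induction l generalizing init with
  | nil => simp
  | cons x xs ih =>
    by_cases h : p x <;> simp [h, ih, add_assoc]

-- ceil(N/2) on a cast natural: -((-n)//2) = (n+1)/2.
theorem ceil_half (n : Nat) :
    -(PySem.Int.floordiv (-(n : Int)) 2) = (((n + 1) / 2 : Nat) : Int) := by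
  rw [PySem.Int.neg_floordiv_neg_eq_iff_of_pos (by omega)]
  constructor <;> [skip; skip] <;> push_cast <;> omega

-- The sums over {divisors with d*d = n} collapse to the square-root correction.
theorem sum_square_part (n : Nat) (hn : 1 ≤ n) :
    (∑ d ∈ n.divisors with d * d = n, d)
      = (if Nat.sqrt n * Nat.sqrt n = n then Nat.sqrt n else 0) := by
  by_cases hsq : Nat.sqrt n * Nat.sqrt n = n
  · have : (n.divisors.filter (fun d => d * d = n)) = {Nat.sqrt n} := by
      ext e
      simp only [Finset.mem_filter, Nat.mem_divisors, Finset.mem_singleton]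
      constructor
      · rintro ⟨_, he⟩
        have : Nat.sqrt (e * e) = e := Nat.sqrt_eq e
        rw [he] at this; omega
      · rintro rfl
        exact ⟨⟨Dvd.intro _ hsq, by omega⟩, hsq⟩
    rw [this, Finset.sum_singleton, if_pos hsq]
  · have : (n.divisors.filter (fun d => d * d = n)) = ∅ := by
      ext e
      simp only [Finset.mem_filter, Nat.mem_divisors, Finset.notMem_empty, iff_false]
      rintro ⟨_, he⟩
      have : Nat.sqrt (e * e) = e := Nat.sqrt_eq e
      rw [he] at this
      rw [this] at hsq
      exact hsq he
    rw [this, Finset.sum_empty, if_neg hsq]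

-- Divisor pairing d ↦ n/d: the cofactor sum over small divisors is the sum of large divisors.
theorem sum_cofactor (n : Nat) (hn : 1 ≤ n) :
    (∑ d ∈ n.divisors with d * d ≤ n, n / d)
      = (∑ e ∈ n.divisors with n ≤ e * e, e) := by
  refine Finset.sum_nbij' (fun d => n / d) (fun e => n / e) ?_ ?_ ?_ ?_ ?_
  · intro d hd
    simp only [Finset.mem_filter, Nat.mem_divisors] at hd ⊢
    obtain ⟨⟨hdvd, hne⟩, hle⟩ := hd
    obtain ⟨k, hk⟩ := hdvd
    have hd0 : 0 < d := Nat.pos_of_dvd_of_pos ⟨k, hk⟩ (by omega)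
    have hkd : n / d = k := by rw [hk]; exact Nat.mul_div_cancel_left k hd0
    refine ⟨⟨Nat.div_dvd_of_dvd ⟨k, hk⟩, hne⟩, ?_⟩
    rw [hkd]
    have hdk : d ≤ k := by nlinarith
    nlinarith
  · intro e he
    simp only [Finset.mem_filter, Nat.mem_divisors] at he ⊢
    obtain ⟨⟨hdvd, hne⟩, hge⟩ := he
    obtain ⟨k, hk⟩ := hdvd
    have he0 : 0 < e := Nat.pos_of_dvd_of_pos ⟨k, hk⟩ (by omega)
    have hke : n / e = k := by rw [hk]; exact Nat.mul_div_cancel_left k he0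
    refine ⟨⟨Nat.div_dvd_of_dvd ⟨k, hk⟩, hne⟩, ?_⟩
    rw [hke]
    have hk0 : 0 < k := by nlinarith
    have hke' : k ≤ e := by nlinarith
    nlinarith
  · intro d hd
    simp only [Finset.mem_filter, Nat.mem_divisors] at hd
    exact Nat.div_div_self hd.1.1 hd.1.2
  · intro e he
    simp only [Finset.mem_filter, Nat.mem_divisors] at he
    exact Nat.div_div_self he.1.1 he.1.2
  · intro d _; rfl

-- Core identity: A's proper-divisor sum + n + square correction = B's paired sum to √n.
theorem key (n : Nat) (hn : 1 ≤ n) :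
    (∑ d ∈ Finset.Ico 1 (min n ((n + 1) / 2 + 1)), if d ∣ n then d else 0) + n
        + (if Nat.sqrt n * Nat.sqrt n = n then Nat.sqrt n else 0)
      = ∑ d ∈ Finset.Ico 1 (Nat.sqrt n + 1), if d ∣ n then d + n / d else 0 := by
  -- A's sum is the sum of proper divisors
  have hA : (∑ d ∈ Finset.Ico 1 (min n ((n + 1) / 2 + 1)), if d ∣ n then d else 0)
      = ∑ d ∈ n.properDivisors, d := by
    rw [← Finset.sum_filter]
    apply Finset.sum_congr _ (fun _ _ => rfl)
    ext d
    simp only [Finset.mem_filter, Finset.mem_Ico, Nat.mem_properDivisors]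
    constructor
    · rintro ⟨⟨h1, h2⟩, hdvd⟩
      exact ⟨hdvd, by omega⟩
    · rintro ⟨hdvd, hlt⟩
      obtain ⟨k, hk⟩ := hdvd
      have hd0 : 0 < d := Nat.pos_of_dvd_of_pos ⟨k, hk⟩ (by omega)
      have hk2 : 2 ≤ k := by
        rcases Nat.lt_or_ge k 2 with h | h
        · interval_cases k <;> omega
        · exact h
      have h2d : 2 * d ≤ n := by nlinarith
      exact ⟨⟨hd0, by omega⟩, ⟨k, hk⟩⟩
  -- B's sum over the range up to √n equals the sum over small divisors
  have hB : (∑ d ∈ Finset.Ico 1 (Nat.sqrt n + 1), if d ∣ n then d + n / d else 0)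
      = ∑ d ∈ n.divisors with d * d ≤ n, (d + n / d) := by
    rw [← Finset.sum_filter]
    apply Finset.sum_congr _ (fun _ _ => rfl)
    ext d
    simp only [Finset.mem_filter, Finset.mem_Ico, Nat.mem_divisors]
    constructor
    · rintro ⟨⟨h1, h2⟩, hdvd⟩
      exact ⟨⟨hdvd, by omega⟩, Nat.le_sqrt.mp (by omega)⟩
    · rintro ⟨⟨hdvd, _⟩, hle⟩
      have hd0 : 0 < d := Nat.pos_of_dvd_of_pos hdvd (by omega)
      have := Nat.le_sqrt.mpr hle
      exact ⟨⟨hd0, by omega⟩, hdvd⟩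
  rw [hA, hB, Finset.sum_add_distrib, sum_cofactor n hn]
  -- split the large-divisor sum into strictly-large and square parts
  have hsplit : (∑ e ∈ n.divisors with n ≤ e * e, e)
      = (∑ e ∈ n.divisors with ¬ (e * e ≤ n), e) + (∑ e ∈ n.divisors with e * e = n, e) := by
    rw [Finset.sum_filter, Finset.sum_filter, Finset.sum_filter, ← Finset.sum_add_distrib]
    apply Finset.sum_congr rfl
    intro e _
    by_cases h1 : e * e = n
    · simp [h1]
    · by_cases h2 : n ≤ e * e
      · rw [if_pos h2, if_pos (by omega), if_neg h1]; omega
      · rw [if_neg h2, if_neg (by omega), if_neg h1]; omega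
  rw [hsplit, sum_square_part n hn]
  have hparts := Finset.sum_filter_add_sum_filter_not n.divisors (fun d => d * d ≤ n) (fun d => d)
  have hsigma := Nat.sum_divisors_eq_sum_properDivisors_add_self (n := n)
  omega

-- The two Sigma implementations agree on every integer.
theorem SigmaA_eq_SigmaB (N : Int) : SigmaA N = SigmaB N := by
  by_cases hneg : N < 1
  · -- both sums are over empty ranges
    simp only [SigmaA, SigmaB, if_pos hneg]
    have h2 : PySem.Int.floordiv (-N) 2 = (-N) / 2 := PySem.Int.floordiv_eq_ediv_of_pos (by omega)
    rw [PySem.List.pyRange_one_eq_nil (by omega)]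
    rfl
  · rw [not_lt] at hneg
    obtain ⟨n, rfl⟩ : ∃ n : Nat, N = (n : Int) := ⟨N.toNat, by omega⟩
    have hn : 1 ≤ n := by exact_mod_cast hneg
    simp only [SigmaA, SigmaB, if_neg (by omega : ¬ ((n : Int) < 1))]
    have htoNat : ((n : Int)).toNat = n := by omega
    rw [htoNat, ceil_half]
    have hmin : min ((n : Int)) ((((n + 1) / 2 : Nat) : Int) + 1)
        = ((min n ((n + 1) / 2 + 1) : Nat) : Int) := by push_cast; omega
    rw [hmin]
    set m := min n ((n + 1) / 2 + 1) with hm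
    have hm1 : 1 ≤ m := by omega
    -- A side to Finset form
    have hA := pysum_eq n id id (fun d _ _ => rfl) (m - 1)
    rw [List.map_id] at hA
    simp only [id_eq] at hA
    have hm2 : 1 + (m - 1) = m := by omega
    rw [hm2] at hA
    have hAcast : ((m : Nat) : Int) = 1 + ((m - 1 : Nat) : Int) := by omega
    rw [hAcast, hA]
    -- B side loop to Finset form
    have hfun : (fun (s d : Int) => if PySem.Int.mod (n : Int) d == 0
          then s + d + PySem.Int.floordiv (n : Int) d else s)
        = (fun s d => if PySem.Int.mod (n : Int) d == 0
          then s + (d + PySem.Int.floordiv (n : Int) d) else s) := by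
      funext s d
      by_cases h : PySem.Int.mod (n : Int) d == 0 <;> simp [h, add_assoc]
    rw [hfun, foldl_if_add]
    have hB := pysum_eq n (fun d => d + PySem.Int.floordiv (n : Int) d)
      (fun d => d + n / d) ?hfg (Nat.sqrt n)
    case hfg =>
      intro d hd1 hdvd
      show ((d : Int) + PySem.Int.floordiv (n : Int) (d : Int)) = ((d + n / d : Nat) : Int)
      rw [PySem.Int.floordiv_natCast n d]; push_cast; ring
    have hr1 : 1 + Nat.sqrt n = Nat.sqrt n + 1 := by omega
    rw [hr1] at hB
    have hBcast : ((Nat.sqrt n : Nat) : Int) + 1 = 1 + ((Nat.sqrt n : Nat) : Int) := by ring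
    rw [hBcast, hB]
    -- finish with the key Nat identity
    have hkey := key n hn
    rw [← hm] at hkey
    simp only [beq_iff_eq]
    by_cases hs : Nat.sqrt n * Nat.sqrt n = n
    · rw [if_pos hs] at hkey
      rw [if_pos (by exact_mod_cast hs :
        ((Nat.sqrt n : Nat) : Int) * ((Nat.sqrt n : Nat) : Int) = ((n : Nat) : Int))]
      omega
    · rw [if_neg hs] at hkey
      rw [if_neg (fun h => hs (by exact_mod_cast h))]
      omega

-- A's inner loop over L appends exactly count(sl) copies of (sl, l), or nothing when sl = l.
theorem inner_loop_eq (L : List Int) (sl l : Int) (acc : List (Int × Int)) :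
    L.foldl (fun result ll =>
      if !(sl == l) && (sl == ll) then result ++ [(ll, l)] else result) acc
    = acc ++ (if sl ≠ l then List.replicate (L.count sl) (sl, l) else []) := by
  rw [PySem.List.foldl_append_if (fun ll => !(sl == l) && (sl == ll)) (fun ll => (ll, l)) L acc]
  congr 1
  by_cases h : sl = l
  · simp [h]
  · have hf : L.filter (fun ll => !(sl == l) && (sl == ll)) = L.filter (· == sl) := by
      apply List.filter_congr
      intro x hx
      by_cases hx2 : x = sl
      · simp [hx2, h]
      · have h2 : (sl == x) = false := beq_false_of_ne (fun hh => hx2 hh.symm)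
        simp [hx2, h2]
    rw [hf, List.filter_beq]
    simp [h]

-- ===== VERDICT =====
theorem Kanten_spec : Claim_equal_Kanten := by
  intro L _
  unfold Spec_Kanten Kanten Kanten_alt
  rw [PySem.Dict.foldl_insert_getD_add_one_eq_counter]
  apply PySem.List.foldl_congr_mem
  intro acc l _
  rw [inner_loop_eq]
  simp only [PySem.Dict.getD_counter, PySem.List.pyRepeat_singleton, Int.toNat_natCast,
    bne_iff_ne]
  have hs : SigmaB l = SigmaA l := (SigmaA_eq_SigmaB l).symm
  by_cases h : SigmaA l = l <;> simp [hs, h]
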